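-- pv_equiv track=rewrite | github.com/jaehoonhwang/advent-of-code | aoc/twenty/day16/day.py | groom_indexes
-- ===== SOURCE A (Python) =====
-- def groom_indexes(indexes):
--     def unpack_single_indexes(idxs, seen):
--         ret = []
--         for i, s in enumerate(idxs):
--             t = tuple(s)
--             if i in seen or len(t) != 1:
--                 continue
--             ret.append((i, t))
--         return ret
--
--     seen = set()
--     while True:
--         single_indexes = unpack_single_indexes(indexes, seen)
--         if not single_indexes:
--             break
--         for i, _ in single_indexes:
--             seen.add(i)
--         for i, index in enumerate(indexes):
--             if i in seen:
--                 continue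
--             for _, single in single_indexes:
--                 indexes[i] = indexes[i].difference(single)
--     print (indexes)
--     return indexes
-- ===== SOURCE B (Python) =====
-- def groom_indexes(indexes):
--     n = len(indexes)
--     originals = [frozenset(s) for s in indexes]
--     where = {}
--     for i in range(n):
--         for v in originals[i]:
--             where.setdefault(v, []).append(i)
--     remaining = [len(s) for s in originals]
--     removed = set()
--     value = {}
--     level = [i for i in range(n) if remaining[i] == 1]
--     while level:
--         for i in level:
--             value[i] = next(v for v in originals[i] if v not in removed)
--         for v in {value[i] for i in level}:
--             removed.add(v)
--             for j in where[v]: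
--                 if j not in value:
--                     remaining[j] -= 1
--         level = [j for j in range(n) if j not in value and remaining[j] == 1]
--     for i in range(n):
--         indexes[i] = {value[i]} if i in value else set(originals[i]) - removed
--     return indexes
-- ===== Notes on version B (the rewrite author's own statement) =====
-- stated objective: alternative
-- what changed: A repeatedly rescans all sets and rebuilds them with one set.difference per (singleton,set) pair until a fixpoint; B never subtracts sets: it builds a value->indices inverted index once, keeps a remaining-count per set plus one global removed-value set, propagates newly resolved singleton values level by level by decrementing counts through the index, and reconstructs every output set in a single final pass. It trades index-building overhead on propagation-light inputs for avoiding repeated set rebuilds on propagation-heavy ones.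
import Mathlib
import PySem

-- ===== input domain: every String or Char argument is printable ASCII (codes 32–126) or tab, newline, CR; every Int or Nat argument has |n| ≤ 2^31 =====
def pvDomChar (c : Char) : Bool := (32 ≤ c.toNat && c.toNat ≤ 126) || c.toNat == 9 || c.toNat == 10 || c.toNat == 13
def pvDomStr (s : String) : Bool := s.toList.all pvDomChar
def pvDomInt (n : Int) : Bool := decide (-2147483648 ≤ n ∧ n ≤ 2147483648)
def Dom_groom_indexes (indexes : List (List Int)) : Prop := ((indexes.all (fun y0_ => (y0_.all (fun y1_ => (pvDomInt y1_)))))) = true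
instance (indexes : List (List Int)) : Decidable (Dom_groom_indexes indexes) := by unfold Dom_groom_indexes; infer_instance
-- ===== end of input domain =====

-- B replaces A's rescan-and-set.difference fixpoint by a worklist propagation: a value->indices
-- inverted index built once, a remaining-count per set, one global removed-value set, and a single
-- final reconstruction pass (objective: alternative algorithm, same result). Both A and B mutate
-- the argument list in place in Python (and A also prints it); the equivalence proved here is
-- about the return value only.

-- ===== PORT A =====
-- inner sets are List Int with distinct elements (PySem.Set convention, see Pre_); tuple(s) is
-- only consulted for its length and used in set difference, so no set iteration order is exposed.
def pvUnpack (idxs : List (List Int)) (seen : PySem.Set Int) : List (Int × List Int) :=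
  (PySem.List.enumerate idxs).foldl
    (fun ret p => if PySem.Set.contains seen p.1 || p.2.length != 1 then ret else ret ++ [p]) []

def pvLoopA (fuel : Nat) (indexes : List (List Int)) (seen : PySem.Set Int) : List (List Int) :=
  match fuel with
  | 0 => indexes
  | fuel' + 1 =>
    let singles := pvUnpack indexes seen
    if singles.isEmpty then indexes
    else
      let seen2 := singles.foldl (fun s p => PySem.Set.add s p.1) seen
      let indexes2 := (PySem.List.enumerate indexes).map (fun p =>
        if PySem.Set.contains seen2 p.1 then p.2
        else singles.foldl (fun cur q => PySem.Set.diff cur q.2) p.2)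
      pvLoopA fuel' indexes2 seen2

-- fuel indexes.length + 1 is exact: every while-iteration except the breaking one adds at least
-- one fresh index (of the n available) to seen, so Python runs at most n+1 iterations.
def groom_indexes (indexes : List (List Int)) : List (List Int) :=
  pvLoopA (indexes.length + 1) indexes PySem.Set.empty

-- ===== PORT B =====
-- where.setdefault(v, []).append(i): net effect on lookups is where[v] = where.get(v, []) ++ [i],
-- ported as Dict.modify; 'for v in originals[i]' iterates a frozenset, whose order only permutes
-- appends to DIFFERENT keys, so iterating the element list is exact.
def pvWhere (originals : List (List Int)) (n : Int) : PySem.Dict Int (List Int) :=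
  (PySem.List.pyRange 0 n 1).foldl (fun d i =>
    (PySem.List.pyGetD originals i []).foldl
      (fun d v => d.modify v [] (fun l => l ++ [i])) d) PySem.Dict.empty

-- next(v for v in originals[i] if v not in removed): Python would raise StopIteration when no such
-- v exists; that branch is unreachable for level members (remaining[i] = 1 there, proved below),
-- so the port totalises it with .getD 0. '{value[i] for i in level}' iterates a Python set; the
-- round's effect is independent of that order (distinct values, commuting decrements), so the port
-- folds over the PySem.Set list. The (removed, remaining) pair is threaded through one fold.
-- next(v for v in originals[i] if v not in removed), totalised (see comment above pvLoopB)
def pvF (originals : List (List Int)) (removed : PySem.Set Int) (i : Int) : Int :=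
  ((PySem.List.pyGetD originals i []).find? (fun v => !PySem.Set.contains removed v)).getD 0

def pvLoopB (fuel : Nat) (originals : List (List Int)) (whereD : PySem.Dict Int (List Int))
    (n : Int) (remaining : List Int) (removed : PySem.Set Int)
    (value : PySem.Dict Int Int) (level : List Int) : PySem.Set Int × PySem.Dict Int Int :=
  match fuel with
  | 0 => (removed, value)
  | fuel' + 1 =>
    if level.isEmpty then (removed, value)
    else
      let value2 := level.foldl (fun val i => val.insert i (pvF originals removed i)) value
      let batch := PySem.Set.ofList (level.map (fun i => value2.getD i 0))
      let st := batch.foldl (fun st v =>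
        (PySem.Set.add st.1 v,
         (whereD.getD v []).foldl (fun rem j =>
            if value2.contains j then rem
            else PySem.List.pySetD rem j (PySem.List.pyGetD rem j 0 - 1)) st.2))
        (removed, remaining)
      let level2 := (PySem.List.pyRange 0 n 1).foldl (fun fr j =>
        if !value2.contains j && (PySem.List.pyGetD st.2 j 0 == 1) then fr ++ [j] else fr) []
      pvLoopB fuel' originals whereD n st.2 st.1 value2 level2

-- same fuel bound as A: each productive round resolves at least one fresh index.
def groom_indexes_alt (indexes : List (List Int)) : List (List Int) :=
  let n : Int := indexes.length
  let originals := indexes.map PySem.Set.ofList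
  let whereD := pvWhere originals n
  let remaining := originals.map (fun s => (s.length : Int))
  let level := (PySem.List.pyRange 0 n 1).foldl (fun fr i =>
      if PySem.List.pyGetD remaining i 0 == 1 then fr ++ [i] else fr) []
  let st := pvLoopB (indexes.length + 1) originals whereD n remaining
      PySem.Set.empty PySem.Dict.empty level
  (PySem.List.pyRange 0 n 1).foldl (fun out i =>
    PySem.List.pySetD out i
      (if st.2.contains i then [st.2.getD i 0]
       else PySem.Set.diff (PySem.List.pyGetD originals i []) st.1)) indexes

-- ===== PRECONDITION & SPEC =====
-- Pre_ only states the encoding invariant of the declared type list[set[int]]: each inner list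
-- holds the DISTINCT elements of a Python set. It excludes no Python input A accepts.
def Pre_groom_indexes (indexes : List (List Int)) : Prop := ∀ s ∈ indexes, s.Nodup
instance (indexes : List (List Int)) : Decidable (Pre_groom_indexes indexes) := by unfold Pre_groom_indexes; infer_instance

def pvWitness_groom_indexes : List (List Int) := [[1], [1, 2], [1, 2, 3]]

def Spec_groom_indexes (indexes : List (List Int)) (out : List (List Int)) : Prop := out = groom_indexes_alt indexes
instance (indexes : List (List Int)) (out : List (List Int)) : Decidable (Spec_groom_indexes indexes out) := by unfold Spec_groom_indexes; infer_instance

-- ===== CLAIM (what is proved, stated in full; the proofs are below) =====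
def Claim_equal_groom_indexes : Prop := ∀ (indexes : List (List Int)), Dom_groom_indexes indexes → Pre_groom_indexes indexes → Spec_groom_indexes indexes (groom_indexes indexes)

-- ===== LEMMAS AND PROOFS =====


theorem pv_foldl_skip_if {α : Type} (p : α → Bool) :
    ∀ (l : List α) (acc : List α),
    l.foldl (fun r x => if p x then r else r ++ [x]) acc = acc ++ l.filter (fun x => !p x) := by
  intro l
  induction l with
  | nil => simp
  | cons x t ih =>
    intro acc
    by_cases h : p x
    · simp [List.foldl_cons, h, ih]
    · simp [List.foldl_cons, h, ih]

theorem pvUnpack_eq (idxs : List (List Int)) (seen : PySem.Set Int) :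
    pvUnpack idxs seen = (PySem.List.enumerate idxs).filter
      (fun p => !(PySem.Set.contains seen p.1 || p.2.length != 1)) := by
  rw [pvUnpack, pv_foldl_skip_if, List.nil_append]

theorem set_append_cons {α : Type} : ∀ (pre : List α) (x v : α) (xs : List α),
    (pre ++ x :: xs).set pre.length v = pre ++ v :: xs := by
  intro pre
  induction pre with
  | nil => intro x v xs; simp
  | cons h t ih => intro x v xs; simp [ih]

theorem pvDiffFold : ∀ (singles : List (Int × List Int)) (s : List Int),
    singles.foldl (fun cur q => PySem.Set.diff cur q.2) s
      = s.filter (fun x => !singles.any (fun q => q.2.contains x)) := by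
  intro singles
  induction singles with
  | nil => simp
  | cons q t ih =>
    intro s
    rw [List.foldl_cons, ih]
    simp only [PySem.Set.diff, List.filter_filter]
    apply List.filter_congr
    intro x _
    simp [List.any_cons, Bool.and_comm]

theorem pvFindFilter {α : Type} (p : α → Bool) :
    ∀ (l : List α), l.find? p = (l.filter p).head? := by
  intro l
  induction l with
  | nil => rfl
  | cons x t ih =>
    by_cases h : p x
    · rw [List.find?_cons_of_pos h, List.filter_cons_of_pos h]; rfl
    · rw [List.find?_cons_of_neg (by simp [h]), List.filter_cons_of_neg (by simp [h]), ih]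

theorem pvOfListNodup : ∀ (l : List Int), l.Nodup → PySem.Set.ofList l = l := by
  intro l
  induction l with
  | nil => intro _; rfl
  | cons x t ih =>
    intro h
    rw [List.nodup_cons] at h
    rw [PySem.Set.ofList_cons, ih h.2]
    simp only [PySem.Set.discard, List.cons.injEq, true_and]
    apply List.filter_eq_self.mpr
    intro a ha
    have hax : a ≠ x := fun hax => h.1 (hax ▸ ha)
    simp [hax]

theorem pvGet?_foldl_insert (f : Int → Int) :
    ∀ (l : List Int) (d : PySem.Dict Int Int) (j : Int),
    (l.foldl (fun val i => val.insert i (f i)) d).get? j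
      = if j ∈ l then some (f j) else d.get? j := by
  intro l
  induction l with
  | nil => intro d j; simp
  | cons i t ih =>
    intro d j
    rw [List.foldl_cons, ih]
    by_cases hjt : j ∈ t
    · simp [hjt]
    · by_cases hji : j = i
      · simp [hji, PySem.Dict.get?_insert]
      · simp [hjt, hji, PySem.Dict.get?_insert]

theorem pvContains_update (s : PySem.Set Int) (l : List Int) (x : Int) :
    PySem.Set.contains (PySem.Set.update s l) x = (PySem.Set.contains s x || l.contains x) := by
  rw [Bool.eq_iff_iff]
  simp [PySem.Set.mem_update, PySem.Set.contains]

theorem pvFoldPairSplit {α β γ : Type} (f : α → γ → α) (g : β → γ → β) :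
    ∀ (l : List γ) (a : α) (b : β),
    (l.foldl (fun st x => (f st.1 x, g st.2 x)) (a, b)) = (l.foldl f a, l.foldl g b) := by
  intro l
  induction l with
  | nil => intro a b; rfl
  | cons x t ih => intro a b; rw [List.foldl_cons, List.foldl_cons, List.foldl_cons, ih]

theorem pvGetDMap {α β : Type} (xs : List α) (f : α → β) (k : Nat) (hk : k < xs.length)
    (d : α) (d' : β) : (xs.map f).getD k d' = f (xs.getD k d) := by
  rw [List.getD_eq_getElem (xs.map f) d' (by simpa using hk), List.getD_eq_getElem xs d hk]
  simp

theorem pvMapEnumGetD {α β : Type} (xs : List α) (g : Int × α → β) (k : Nat)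
    (hk : k < xs.length) (d : α) (d' : β) :
    ((PySem.List.enumerate xs).map g).getD k d' = g ((k : Int), xs.getD k d) := by
  have hlen : k < (PySem.List.enumerate xs).length := by
    rw [PySem.List.length_enumerate]; exact hk
  rw [List.getD_eq_getElem _ d' (by simpa using hlen)]
  rw [List.getElem_map]
  rw [PySem.List.getElem_enumerate]
  rw [List.getD_eq_getElem xs d hk]
  norm_num

theorem pvUnpackFst (idxs : List (List Int)) (seen : PySem.Set Int) :
    (pvUnpack idxs seen).map Prod.fst
      = (PySem.List.pyRange 0 (idxs.length : Int)).filter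
          (fun j => !(PySem.Set.contains seen j
                      || (PySem.List.pyGetD idxs j []).length != 1)) := by
  rw [pvUnpack_eq, PySem.List.enumerate_eq_map_pyRange idxs ([] : List Int)]
  rw [List.filter_map, List.map_map]
  have h1 : (Prod.fst ∘ fun j => (j, PySem.List.pyGetD idxs j [])) = id := rfl
  rw [h1, List.map_id]
  rfl

theorem pvSetAllFold (f : Int → List Int) :
    ∀ (xs pre : List (List Int)) (a : Nat), pre.length = a →
    (PySem.List.pyRange (a : Int) ((a : Int) + (xs.length : Int))).foldl
        (fun out i => PySem.List.pySetD out i (f i)) (pre ++ xs)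
      = pre ++ (PySem.List.pyRange (a : Int) ((a : Int) + (xs.length : Int))).map f := by
  intro xs
  induction xs with
  | nil =>
    intro pre a ha
    rw [show ((a : Int) + (([] : List (List Int)).length : Int)) = (a : Int) by simp]
    rw [PySem.List.pyRange_one_eq_nil (le_refl _)]
    simp
  | cons x t ih =>
    intro pre a ha
    have hlt : ((a : Int)) < (a : Int) + (((x :: t) : List (List Int)).length : Int) := by
      simp only [List.length_cons]; push_cast; omega
    rw [PySem.List.pyRange_one_cons hlt, List.foldl_cons, List.map_cons]
    have hset : PySem.List.pySetD (pre ++ x :: t) (a : Int) (f (a : Int)) = pre ++ f (a : Int) :: t := by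
      rw [PySem.List.pySetD_natCast, ← ha, set_append_cons]
    rw [hset]
    have hc1 : (a : Int) + 1 = ((a + 1 : Nat) : Int) := by push_cast; ring
    have hc2 : (a : Int) + (((x :: t) : List (List Int)).length : Int)
        = ((a + 1 : Nat) : Int) + (t.length : Int) := by
      simp only [List.length_cons]; push_cast; ring
    rw [hc1, hc2]
    have := ih (pre ++ [f (a : Int)]) (a + 1) (by simp [ha])
    rw [List.append_assoc] at this
    simp only [List.cons_append, List.nil_append] at this
    rw [this]
    simp

theorem pvWhere_aux (orig : List (List Int)) (hnd : ∀ s ∈ orig, s.Nodup) (v : Int) :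
    ∀ (m : Nat), m ≤ orig.length → ∀ (d : PySem.Dict Int (List Int)),
    ((PySem.List.pyRange 0 (m : Int)).foldl (fun d i =>
        (PySem.List.pyGetD orig i []).foldl
          (fun d v => d.modify v [] (fun l => l ++ [i])) d) d).getD v []
      = d.getD v [] ++ (PySem.List.pyRange 0 (m : Int)).filter
          (fun i => (PySem.List.pyGetD orig i []).contains v) := by
  intro m
  induction m with
  | zero => intro _ d; rw [PySem.List.pyRange_one_eq_nil (by norm_num)]; simp
  | succ m ih =>
    intro hm d
    have hcast : ((m + 1 : Nat) : Int) = (m : Int) + 1 := by push_cast; ring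
    rw [hcast, PySem.List.pyRange_one_succ_right (by positivity), List.foldl_append,
        List.filter_append, List.foldl_cons, List.foldl_nil]
    -- the last step: the inner fold over orig[m]
    set D := (PySem.List.pyRange 0 (m : Int)).foldl (fun d i =>
        (PySem.List.pyGetD orig i []).foldl
          (fun d v => d.modify v [] (fun l => l ++ [i])) d) d with hD
    have hinner : ((PySem.List.pyGetD orig (m : Int) []).foldl
        (fun d w => d.modify w [] (fun l => l ++ [(m : Int)])) D).getD v []
        = D.getD v [] ++ (((PySem.List.pyGetD orig (m : Int) []).filter (fun w => w == v)).map
            (fun _ => (m : Int))) := by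
      rw [show ((PySem.List.pyGetD orig (m : Int) []).foldl
            (fun d w => d.modify w [] (fun l => l ++ [(m : Int)])) D)
          = (((PySem.List.pyGetD orig (m : Int) []).map (fun w => (w, (m : Int)))).foldl
              (fun d p => d.modify p.1 [] (fun l => l ++ [p.2])) D) by rw [List.foldl_map]]
      rw [PySem.Dict.getD_foldl_modify_append]
      rw [List.filter_map, List.map_map]
      rfl
    rw [hinner, ih (by omega) d, List.append_assoc]
    congr 1
    -- (orig[m].filter (== v)).map (const m) = if contains then [m] else []
    have hsm : (PySem.List.pyGetD orig (m : Int) []) = orig.getD m [] := by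
      rw [PySem.List.pyGetD_natCast]
    have hmem : orig.getD m [] ∈ orig := by
      rw [List.getD_eq_getElem orig [] (by omega)]
      exact List.getElem_mem _
    have hnds : (orig.getD m []).Nodup := hnd _ hmem
    by_cases hv : (PySem.List.pyGetD orig (m : Int) []).contains v
    · have hvmem : v ∈ orig.getD m [] := by
        rw [hsm] at hv; exact List.contains_iff_mem.mp hv
      rw [hsm, List.filter_beq, List.count_eq_one_of_mem hnds hvmem]
      rw [List.getD_eq_getElem?_getD] at hvmem
      simp [hsm, hvmem]
    · have hvmem : v ∉ orig.getD m [] := by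
        rw [hsm] at hv; exact fun hmem' => hv (List.contains_iff_mem.mpr hmem')
      rw [hsm, List.filter_beq, List.count_eq_zero_of_not_mem hvmem]
      rw [List.getD_eq_getElem?_getD] at hvmem
      simp [hsm, hvmem]

theorem pvWhere_getD (orig : List (List Int)) (hnd : ∀ s ∈ orig, s.Nodup) (v : Int) :
    (pvWhere orig (orig.length : Int)).getD v []
      = (PySem.List.pyRange 0 (orig.length : Int)).filter
          (fun i => (PySem.List.pyGetD orig i []).contains v) := by
  rw [pvWhere, pvWhere_aux orig hnd v orig.length (le_refl _) PySem.Dict.empty]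
  simp [PySem.Dict.getD_eq_get?_getD, PySem.Dict.get?_empty]

theorem pvDecFold (c : Int → Bool) :
    ∀ (L rem : List Int), L.Nodup → (∀ j ∈ L, 0 ≤ j ∧ j < (rem.length : Int)) →
    (L.foldl (fun rem j => if c j then rem
        else PySem.List.pySetD rem j (PySem.List.pyGetD rem j 0 - 1)) rem).length = rem.length ∧
    ∀ (k : Nat), k < rem.length →
      (L.foldl (fun rem j => if c j then rem
          else PySem.List.pySetD rem j (PySem.List.pyGetD rem j 0 - 1)) rem).getD k 0
        = if !c (k : Int) && L.contains (k : Int) then rem.getD k 0 - 1 else rem.getD k 0 := by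
  intro L
  induction L with
  | nil => intro rem _ _; simp
  | cons j t ih =>
    intro rem hnd hrange
    rw [List.nodup_cons] at hnd
    rw [List.foldl_cons]
    by_cases hc : c j
    · rw [if_pos hc]
      obtain ⟨hlen, hptw⟩ := ih rem hnd.2 (fun x hx => hrange x (List.mem_cons_of_mem _ hx))
      refine ⟨hlen, fun k hk => ?_⟩
      rw [hptw k hk]
      rw [List.contains_cons]
      by_cases hkj : (k : Int) = j
      · simp [hkj, hc]
      · simp [hkj]
    · rw [if_neg hc]
      obtain ⟨hj0, hjlt⟩ := hrange j (List.mem_cons_self)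
      set rem' := PySem.List.pySetD rem j (PySem.List.pyGetD rem j 0 - 1) with hrem'
      have hlen' : rem'.length = rem.length := PySem.List.length_pySetD rem j _
      obtain ⟨hlen, hptw⟩ := ih rem' hnd.2
        (fun x hx => by rw [hlen']; exact hrange x (List.mem_cons_of_mem _ hx))
      refine ⟨by rw [hlen, hlen'], fun k hk => ?_⟩
      rw [hptw k (by rw [hlen']; exact hk)]
      have hget' : ∀ (k : Nat), k < rem.length →
          rem'.getD k 0 = if (k : Int) = j then rem.getD k 0 - 1 else rem.getD k 0 := by
        intro k' hk'
        rw [hrem', PySem.List.pySetD_of_nonneg rem _ hj0]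
        by_cases hkj : (k' : Int) = j
        · have hkn : k' = j.toNat := by omega
          rw [if_pos hkj, List.getD_eq_getElem?_getD, hkn,
              List.getElem?_set_self (by omega)]
          rw [PySem.List.pyGetD_eq_getElem rem 0 hj0 hjlt]
          rw [List.getD_eq_getElem rem 0 (by omega)]
          simp
        · have hkn : j.toNat ≠ k' := by omega
          rw [if_neg hkj, List.getD_eq_getElem?_getD, List.getElem?_set_ne hkn,
              ← List.getD_eq_getElem?_getD]
      rw [List.contains_cons]
      by_cases hkj : (k : Int) = j
      · have hcj : c j = false := by revert hc; cases c j <;> simp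
        have hjt : j ∉ t := hnd.1
        rw [hget' k hk, if_pos hkj]
        simp [hkj, hcj, hjt]
      · rw [hget' k hk, if_neg hkj]
        simp [hkj]

theorem pvDecBatch (orig : List (List Int)) (hnd : ∀ s ∈ orig, s.Nodup) (c : Int → Bool) :
    ∀ (B rem : List Int), rem.length = orig.length →
    (B.foldl (fun rem v => ((pvWhere orig (orig.length : Int)).getD v []).foldl
        (fun rem j => if c j then rem
          else PySem.List.pySetD rem j (PySem.List.pyGetD rem j 0 - 1)) rem) rem).length
      = orig.length ∧
    ∀ (k : Nat), k < orig.length →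
      (B.foldl (fun rem v => ((pvWhere orig (orig.length : Int)).getD v []).foldl
          (fun rem j => if c j then rem
            else PySem.List.pySetD rem j (PySem.List.pyGetD rem j 0 - 1)) rem) rem).getD k 0
        = if c (k : Int) then rem.getD k 0
          else rem.getD k 0
            - ((B.filter (fun v => (PySem.List.pyGetD orig (k : Int) []).contains v)).length : Int) := by
  intro B
  induction B with
  | nil =>
    intro rem hrl
    refine ⟨hrl, fun k hk => ?_⟩
    by_cases hc : c (k : Int) <;> simp [hc]
  | cons v B' ih =>
    intro rem hrl
    rw [List.foldl_cons]
    have hW : (pvWhere orig (orig.length : Int)).getD v []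
        = (PySem.List.pyRange 0 (orig.length : Int)).filter
            (fun i => (PySem.List.pyGetD orig i []).contains v) := pvWhere_getD orig hnd v
    have hWnd : ((pvWhere orig (orig.length : Int)).getD v []).Nodup := by
      rw [hW]; exact (PySem.List.nodup_pyRange_one 0 _).filter _
    have hWrange : ∀ j ∈ (pvWhere orig (orig.length : Int)).getD v [], 0 ≤ j ∧ j < (rem.length : Int) := by
      intro j hj
      rw [hW] at hj
      have := List.mem_of_mem_filter hj
      rw [PySem.List.mem_pyRange_one] at this
      omega
    obtain ⟨hlen1, hptw1⟩ := pvDecFold c ((pvWhere orig (orig.length : Int)).getD v []) rem hWnd hWrange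
    obtain ⟨hlen2, hptw2⟩ := ih _ (by rw [hlen1, hrl])
    refine ⟨hlen2, fun k hk => ?_⟩
    rw [hptw2 k hk]
    have hWc : ((pvWhere orig (orig.length : Int)).getD v []).contains (k : Int)
        = (PySem.List.pyGetD orig (k : Int) []).contains v := by
      rw [Bool.eq_iff_iff, hW]
      simp only [List.contains_iff_mem, List.mem_filter, PySem.List.mem_pyRange_one]
      constructor
      · rintro ⟨_, h⟩; exact h
      · intro h
        exact ⟨⟨by omega, by omega⟩, h⟩
    rw [hptw1 k (by omega), hWc, List.filter_cons]
    by_cases hc : c (k : Int)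
    · simp [hc]
    · have hcf : c (k : Int) = false := by revert hc; cases c (k : Int) <;> simp
      by_cases hv : (PySem.List.pyGetD orig (k : Int) []).contains v
      · rw [if_neg hc, if_neg hc, if_pos (by rw [hcf, hv]; rfl), if_pos hv, List.length_cons]
        push_cast
        ring
      · have hvf : (PySem.List.pyGetD orig (k : Int) []).contains v = false := by
          revert hv; cases (PySem.List.pyGetD orig (k : Int) []).contains v <;> simp
        rw [if_neg hc, if_neg hc, if_neg (by rw [hcf, hvf]; simp), if_neg (by rw [hvf]; simp)]

def pvFinish (orig base : List (List Int)) (st : PySem.Set Int × PySem.Dict Int Int) :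
    List (List Int) :=
  (PySem.List.pyRange 0 (orig.length : Int)).foldl (fun out i =>
    PySem.List.pySetD out i
      (if st.2.contains i then [st.2.getD i 0]
       else PySem.Set.diff (PySem.List.pyGetD orig i []) st.1)) base

theorem pvFinish_stop (orig base idxs : List (List Int)) (removed : PySem.Set Int)
    (value : PySem.Dict Int Int) (hb : base.length = orig.length)
    (hlen : idxs.length = orig.length)
    (hidx : ∀ (k : Nat), k < orig.length → idxs.getD k []
        = (match value.get? (k : Int) with
           | some v => [v]
           | none => (orig.getD k []).filter (fun x => !PySem.Set.contains removed x))) :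
    pvFinish orig base (removed, value) = idxs := by
  unfold pvFinish
  have h0 : ((0 : Nat) : Int) = (0 : Int) := rfl
  have hfold := pvSetAllFold (fun i =>
      (if value.contains i then [value.getD i 0]
       else PySem.Set.diff (PySem.List.pyGetD orig i []) removed)) base [] 0 rfl
  simp only [Nat.cast_zero, zero_add, List.nil_append] at hfold
  rw [show (orig.length : Int) = (base.length : Int) by rw [hb], hfold]
  apply List.ext_getElem
  · simp [PySem.List.length_pyRange_one, hlen, hb]
  · intro k h1 h2
    have hkb : k < base.length := by
      have := h1
      simpa [PySem.List.length_pyRange_one] using this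
    have hko : k < orig.length := by omega
    have hrk : (PySem.List.pyRange 0 (base.length : Int))[k]'(by
        simpa [PySem.List.length_pyRange_one] using hkb) = (k : Int) := by
      rw [PySem.List.getElem_pyRange_one]; ring
    rw [List.getElem_map]
    rw [hrk]
    rw [← List.getD_eq_getElem idxs [] h2, hidx k hko]
    cases hvk : value.get? (k : Int) with
    | some v =>
      have hc : value.contains (k : Int) = true := by
        rw [PySem.Dict.contains_eq_isSome_get?, hvk]; rfl
      rw [if_pos hc, PySem.Dict.getD_eq_get?_getD, hvk]
      rfl
    | none =>
      have hc : value.contains (k : Int) = false := by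
        rw [PySem.Dict.contains_eq_isSome_get?, hvk]; rfl
      rw [if_neg (by rw [hc]; simp)]
      simp only [PySem.Set.diff, PySem.List.pyGetD_natCast]

theorem pvLoopA_succ (f : Nat) (idxs : List (List Int)) (seen : PySem.Set Int) :
    pvLoopA (f + 1) idxs seen =
      (if (pvUnpack idxs seen).isEmpty then idxs
       else pvLoopA f
         ((PySem.List.enumerate idxs).map (fun p =>
            if PySem.Set.contains
                ((pvUnpack idxs seen).foldl (fun s p => PySem.Set.add s p.1) seen) p.1
            then p.2
            else (pvUnpack idxs seen).foldl (fun cur q => PySem.Set.diff cur q.2) p.2))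
         ((pvUnpack idxs seen).foldl (fun s p => PySem.Set.add s p.1) seen)) := rfl

theorem pvLoopB_succ (f : Nat) (orig : List (List Int)) (whereD : PySem.Dict Int (List Int))
    (n : Int) (remaining : List Int) (removed : PySem.Set Int) (value : PySem.Dict Int Int)
    (level : List Int) :
    pvLoopB (f + 1) orig whereD n remaining removed value level =
      (if level.isEmpty then (removed, value)
       else
        pvLoopB f orig whereD n
          ((PySem.Set.ofList (level.map (fun i =>
              (level.foldl (fun val i => val.insert i (pvF orig removed i)) value).getD i 0))).foldl
            (fun st v =>
              (PySem.Set.add st.1 v,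
               (whereD.getD v []).foldl (fun rem j =>
                  if (level.foldl (fun val i => val.insert i (pvF orig removed i)) value).contains j
                  then rem
                  else PySem.List.pySetD rem j (PySem.List.pyGetD rem j 0 - 1)) st.2))
            (removed, remaining)).2
          ((PySem.Set.ofList (level.map (fun i =>
              (level.foldl (fun val i => val.insert i (pvF orig removed i)) value).getD i 0))).foldl
            (fun st v =>
              (PySem.Set.add st.1 v,
               (whereD.getD v []).foldl (fun rem j =>
                  if (level.foldl (fun val i => val.insert i (pvF orig removed i)) value).contains j
                  then rem
                  else PySem.List.pySetD rem j (PySem.List.pyGetD rem j 0 - 1)) st.2))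
            (removed, remaining)).1
          (level.foldl (fun val i => val.insert i (pvF orig removed i)) value)
          ((PySem.List.pyRange 0 n).foldl (fun fr j =>
            if !(level.foldl (fun val i => val.insert i (pvF orig removed i)) value).contains j
                && (PySem.List.pyGetD
                      ((PySem.Set.ofList (level.map (fun i =>
                          (level.foldl (fun val i => val.insert i (pvF orig removed i)) value).getD i 0))).foldl
                        (fun st v =>
                          (PySem.Set.add st.1 v,
                           (whereD.getD v []).foldl (fun rem j =>
                              if (level.foldl (fun val i => val.insert i (pvF orig removed i)) value).contains j
                              then rem
                              else PySem.List.pySetD rem j (PySem.List.pyGetD rem j 0 - 1)) st.2))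
                        (removed, remaining)).2 j 0 == 1)
            then fr ++ [j] else fr) [])) := rfl

theorem pvCount (s batch : List Int) (R : Int → Bool) (hs : s.Nodup) (hbn : batch.Nodup)
    (hfresh : ∀ x ∈ batch, R x = false) :
    ((s.filter (fun x => !(R x || batch.contains x))).length : Int)
      = ((s.filter (fun x => !R x)).length : Int)
        - ((batch.filter (fun v => s.contains v)).length : Int) := by
  have h1 : s.filter (fun x => !(R x || batch.contains x))
      = (s.filter (fun x => !R x)).filter (fun x => !batch.contains x) := by
    rw [List.filter_filter]
    apply List.filter_congr
    intro x _
    cases R x <;> cases batch.contains x <;> simp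
  have h2 : ((s.filter (fun x => !R x)).filter (fun x => batch.contains x)).length
      = (batch.filter (fun v => s.contains v)).length := by
    apply List.Perm.length_eq
    apply (List.perm_ext_iff_of_nodup ((hs.filter _).filter _) (hbn.filter _)).mpr
    intro a
    simp only [List.mem_filter, List.contains_iff_mem]
    constructor
    · rintro ⟨⟨has, _⟩, hab⟩; exact ⟨hab, has⟩
    · rintro ⟨hab, has⟩
      refine ⟨⟨has, ?_⟩, hab⟩
      rw [hfresh a hab]
      rfl
  have h3 := List.length_eq_length_filter_add (l := s.filter (fun x => !R x)) (fun x => batch.contains x)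
  rw [h1]
  omega

theorem pvMain (orig : List (List Int)) (hnd : ∀ s ∈ orig, s.Nodup) :
    ∀ (fuel : Nat) (idxs base : List (List Int)) (seen : PySem.Set Int)
      (remaining : List Int) (removed : PySem.Set Int) (value : PySem.Dict Int Int)
      (level : List Int),
      idxs.length = orig.length → base.length = orig.length →
      remaining.length = orig.length →
      (∀ (k : Nat), k < orig.length → idxs.getD k []
          = (match value.get? (k : Int) with
             | some v => [v]
             | none => (orig.getD k []).filter (fun x => !PySem.Set.contains removed x))) →
      (∀ (k : Nat), k < orig.length → remaining.getD k 0
          = (if value.contains (k : Int) then 1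
             else (((orig.getD k []).filter (fun x => !PySem.Set.contains removed x)).length : Int))) →
      (∀ j : Int, PySem.Set.contains seen j = value.contains j) →
      level = (pvUnpack idxs seen).map Prod.fst →
      pvLoopA fuel idxs seen
        = pvFinish orig base
            (pvLoopB fuel orig (pvWhere orig (orig.length : Int)) (orig.length : Int)
              remaining removed value level) := by
  intro fuel
  induction fuel with
  | zero =>
    intro idxs base seen remaining removed value level hlen hb hrlen hidx hrem hseen hlevel
    exact (pvFinish_stop orig base idxs removed value hb hlen hidx).symm
  | succ f ih =>
    intro idxs base seen remaining removed value level hlen hb hrlen hidx hrem hseen hlevel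
    rw [pvLoopA_succ, pvLoopB_succ]
    by_cases hemp : (pvUnpack idxs seen).isEmpty
    · have hlev : level.isEmpty := by
        rw [hlevel]
        rcases hu : pvUnpack idxs seen with _ | ⟨q, t⟩
        · rfl
        · rw [hu] at hemp; exact absurd hemp (by simp)
      rw [if_pos hemp, if_pos hlev]
      exact (pvFinish_stop orig base idxs removed value hb hlen hidx).symm
    · have hlev : ¬ level.isEmpty := by
        rw [hlevel]
        rcases hu : pvUnpack idxs seen with _ | ⟨q, t⟩
        · rw [hu] at hemp; exact absurd rfl hemp
        · simp
      rw [if_neg hemp, if_neg hlev]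
      -- facts about the singles of this round
      have hq : ∀ q ∈ pvUnpack idxs seen, ∃ k : Nat, k < orig.length ∧ q.1 = (k : Int)
          ∧ q.2 = idxs.getD k [] ∧ q.2.length = 1 ∧ PySem.Set.contains seen q.1 = false := by
        intro q hq0
        rw [pvUnpack_eq] at hq0
        have hcond := List.of_mem_filter hq0
        have hmem := List.mem_of_mem_filter hq0
        rw [PySem.List.mem_enumerate_iff] at hmem
        obtain ⟨k, hk, rfl⟩ := hmem
        simp only [Bool.not_eq_eq_eq_not, Bool.not_true, Bool.or_eq_false_iff,
          bne_eq_false_iff_eq] at hcond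
        exact ⟨k, by omega, by simp, (List.getD_eq_getElem idxs [] hk).symm,
          hcond.2, hcond.1⟩
      have hqv : ∀ q ∈ pvUnpack idxs seen, value.get? q.1 = none
          ∧ q.2 = [pvF orig removed q.1]
          ∧ PySem.Set.contains removed (pvF orig removed q.1) = false := by
        intro q hq0
        obtain ⟨k, hk, hq1, hq2, hlen1, hcont⟩ := hq q hq0
        have hvc : value.contains q.1 = false := by rw [← hseen]; exact hcont
        have hvn : value.get? q.1 = none := (PySem.Dict.get?_eq_none_iff_contains value q.1).mpr hvc
        have hfil : idxs.getD k []
            = (orig.getD k []).filter (fun x => !PySem.Set.contains removed x) := by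
          have h := hidx k hk
          rw [hq1] at hvn
          rw [hvn] at h
          exact h
        obtain ⟨w, hw⟩ := List.length_eq_one_iff.mp (by rw [hq2, hfil] at hlen1; exact hlen1)
        have hfw : pvF orig removed q.1 = w := by
          show ((PySem.List.pyGetD orig q.1 []).find?
              (fun v => !PySem.Set.contains removed v)).getD 0 = w
          rw [hq1, PySem.List.pyGetD_natCast, pvFindFilter, hw]
          rfl
        refine ⟨hvn, ?_, ?_⟩
        · rw [hfw, hq2, hfil, hw]
        · rw [hfw]
          have hwmem : w ∈ (orig.getD k []).filter (fun x => !PySem.Set.contains removed x) := by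
            rw [hw]; exact List.mem_singleton.mpr rfl
          have := List.of_mem_filter hwmem
          revert this
          cases PySem.Set.contains removed w <;> simp
      -- the updated dict
      have hv2get : ∀ j : Int,
          (level.foldl (fun val i => val.insert i (pvF orig removed i)) value).get? j
            = if j ∈ level then some (pvF orig removed j) else value.get? j :=
        fun j => pvGet?_foldl_insert (pvF orig removed) level value j
      have hv2c : ∀ j : Int,
          (level.foldl (fun val i => val.insert i (pvF orig removed i)) value).contains j
            = (value.contains j || level.contains j) := by
        intro j
        rw [PySem.Dict.contains_eq_isSome_get?, hv2get j]
        by_cases hj : j ∈ level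
        · simp [hj]
        · simp [hj, PySem.Dict.contains_eq_isSome_get?]
      -- the updated seen set
      have hseen2 : ∀ j : Int,
          PySem.Set.contains ((pvUnpack idxs seen).foldl (fun s p => PySem.Set.add s p.1) seen) j
            = (level.foldl (fun val i => val.insert i (pvF orig removed i)) value).contains j := by
        intro j
        have hupd : (pvUnpack idxs seen).foldl (fun s p => PySem.Set.add s p.1) seen
            = PySem.Set.update seen level := by
          simp only [PySem.Set.update, hlevel, List.foldl_map]
        rw [hupd, pvContains_update, hseen j, hv2c j]
      -- the batch of newly removed values, as a plain map
      have hbatchF : level.map (fun i =>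
            (level.foldl (fun val i => val.insert i (pvF orig removed i)) value).getD i 0)
          = level.map (pvF orig removed) := by
        apply List.map_congr_left
        intro i hi
        rw [PySem.Dict.getD_eq_get?_getD, hv2get i, if_pos hi]
        rfl
      have hbs : ∀ x : Int,
          PySem.Set.contains (PySem.Set.ofList (level.map (fun i =>
              (level.foldl (fun val i => val.insert i (pvF orig removed i)) value).getD i 0))) x
            = (pvUnpack idxs seen).any (fun q => q.2.contains x) := by
        intro x
        rw [hbatchF, Bool.eq_iff_iff]
        rw [PySem.Set.contains_iff]
        rw [PySem.Set.mem_ofList]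
        simp only [List.mem_map, List.any_eq_true, List.contains_iff_mem]
        constructor
        · rintro ⟨i, hi, rfl⟩
          rw [hlevel] at hi
          obtain ⟨q, hq', rfl⟩ := List.mem_map.mp hi
          refine ⟨q, hq', ?_⟩
          rw [(hqv q hq').2.1]
          exact List.mem_singleton.mpr rfl
        · rintro ⟨q, hq', hx⟩
          rw [(hqv q hq').2.1] at hx
          refine ⟨q.1, by rw [hlevel]; exact List.mem_map_of_mem hq', ?_⟩
          exact (List.mem_singleton.mp hx).symm
      have hbfresh : ∀ x ∈ PySem.Set.ofList (level.map (fun i =>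
            (level.foldl (fun val i => val.insert i (pvF orig removed i)) value).getD i 0)),
          PySem.Set.contains removed x = false := by
        intro x hx
        rw [hbatchF] at hx
        rw [PySem.Set.mem_ofList] at hx
        obtain ⟨i, hi, rfl⟩ := List.mem_map.mp hx
        rw [hlevel] at hi
        obtain ⟨q, hq', rfl⟩ := List.mem_map.mp hi
        exact (hqv q hq').2.2
      -- split the paired fold
      have hsplit : ∀ (B : List Int),
          (B.foldl (fun st v =>
              (PySem.Set.add st.1 v,
               ((pvWhere orig (orig.length : Int)).getD v []).foldl (fun rem j =>
                  if (level.foldl (fun val i => val.insert i (pvF orig removed i)) value).contains j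
                  then rem
                  else PySem.List.pySetD rem j (PySem.List.pyGetD rem j 0 - 1)) st.2))
            (removed, remaining))
          = (B.foldl PySem.Set.add removed,
             B.foldl (fun rem v => ((pvWhere orig (orig.length : Int)).getD v []).foldl
               (fun rem j =>
                  if (level.foldl (fun val i => val.insert i (pvF orig removed i)) value).contains j
                  then rem
                  else PySem.List.pySetD rem j (PySem.List.pyGetD rem j 0 - 1)) rem) remaining) := by
        intro B
        exact pvFoldPairSplit (fun s v => PySem.Set.add s v)
          (fun rem v => ((pvWhere orig (orig.length : Int)).getD v []).foldl
            (fun rem j =>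
               if (level.foldl (fun val i => val.insert i (pvF orig removed i)) value).contains j
               then rem
               else PySem.List.pySetD rem j (PySem.List.pyGetD rem j 0 - 1)) rem)
          B removed remaining
      have hsplit1 : ∀ B : List Int,
          (B.foldl (fun st v =>
              (PySem.Set.add st.1 v,
               ((pvWhere orig (orig.length : Int)).getD v []).foldl (fun rem j =>
                  if (level.foldl (fun val i => val.insert i (pvF orig removed i)) value).contains j
                  then rem
                  else PySem.List.pySetD rem j (PySem.List.pyGetD rem j 0 - 1)) st.2))
            (removed, remaining)).1 = B.foldl PySem.Set.add removed := by
        intro B; rw [hsplit B]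
      have hsplit2 : ∀ B : List Int,
          (B.foldl (fun st v =>
              (PySem.Set.add st.1 v,
               ((pvWhere orig (orig.length : Int)).getD v []).foldl (fun rem j =>
                  if (level.foldl (fun val i => val.insert i (pvF orig removed i)) value).contains j
                  then rem
                  else PySem.List.pySetD rem j (PySem.List.pyGetD rem j 0 - 1)) st.2))
            (removed, remaining)).2
          = B.foldl (fun rem v => ((pvWhere orig (orig.length : Int)).getD v []).foldl
              (fun rem j =>
                  if (level.foldl (fun val i => val.insert i (pvF orig removed i)) value).contains j
                  then rem
                  else PySem.List.pySetD rem j (PySem.List.pyGetD rem j 0 - 1)) rem) remaining := by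
        intro B; rw [hsplit B]
      rw [hsplit1, hsplit2]
      set V2 := level.foldl (fun val i => val.insert i (pvF orig removed i)) value with hV2
      set B2 := PySem.Set.ofList (level.map (fun i => V2.getD i 0)) with hB2
      set RM2 := B2.foldl PySem.Set.add removed with hRM2
      set REM2 := B2.foldl (fun rem v => ((pvWhere orig (orig.length : Int)).getD v []).foldl
        (fun rem j => if V2.contains j then rem
          else PySem.List.pySetD rem j (PySem.List.pyGetD rem j 0 - 1)) rem) remaining with hREM2
      set S2 := (pvUnpack idxs seen).foldl (fun s p => PySem.Set.add s p.1) seen with hS2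
      set I2 := (PySem.List.enumerate idxs).map (fun p =>
        if PySem.Set.contains S2 p.1 then p.2
        else (pvUnpack idxs seen).foldl (fun cur q => PySem.Set.diff cur q.2) p.2) with hI2
      have hdec := pvDecBatch orig hnd (fun j => V2.contains j) B2 remaining hrlen
      have hrm2c : ∀ x : Int, PySem.Set.contains RM2 x
          = (PySem.Set.contains removed x || B2.contains x) := by
        intro x
        exact pvContains_update removed B2 x
      -- the facts about indices newly resolved this round
      have hlev1 : ∀ k : Nat, k < orig.length → ((k : Int)) ∈ level →
          value.get? (k : Int) = none
          ∧ idxs.getD k [] = [pvF orig removed (k : Int)]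
          ∧ (orig.getD k []).filter (fun x => !PySem.Set.contains removed x)
              = [pvF orig removed (k : Int)] := by
        intro k hk hkl
        rw [hlevel] at hkl
        obtain ⟨q, hq', hq1⟩ := List.mem_map.mp hkl
        obtain ⟨k', hk', hqk, hq2, hlen1, _⟩ := hq q hq'
        have hkk : k' = k := by rw [hqk] at hq1; exact_mod_cast hq1
        subst hkk
        obtain ⟨hvn, hq2f, _⟩ := hqv q hq'
        have hvnk : value.get? ((k' : Nat) : Int) = none := by rw [← hq1]; exact hvn
        have hfil : idxs.getD k' []
            = (orig.getD k' []).filter (fun x => !PySem.Set.contains removed x) := by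
          have h := hidx k' hk'
          rw [hvnk] at h
          exact h
        refine ⟨hvnk, ?_, ?_⟩
        · rw [← hq2, hq2f, hq1]
        · rw [← hfil, ← hq2, hq2f, hq1]
      have hidx2 : ∀ (k : Nat), k < orig.length → I2.getD k []
          = (match V2.get? (k : Int) with
             | some v => [v]
             | none => (orig.getD k []).filter (fun x => !PySem.Set.contains RM2 x)) := by
        intro k hk
        have hkidx : k < idxs.length := by omega
        rw [hI2, pvMapEnumGetD idxs _ k hkidx [] []]
        cases hv2 : V2.get? (k : Int) with
        | some v =>
          have hs2 : PySem.Set.contains S2 (k : Int) = true := by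
            rw [hseen2 (k : Int), PySem.Dict.contains_eq_isSome_get?, hv2]
            rfl
          rw [if_pos hs2]
          have hg := hv2get (k : Int)
          rw [hv2] at hg
          by_cases hkl : ((k : Int)) ∈ level
          · rw [if_pos hkl] at hg
            obtain ⟨_, hidxk, _⟩ := hlev1 k hk hkl
            rw [hidxk]
            injection hg.symm with hg'
            rw [hg']
          · rw [if_neg hkl] at hg
            have h := hidx k hk
            rw [← hg] at h
            exact h
        | none =>
          have hs2 : PySem.Set.contains S2 (k : Int) = false := by
            rw [hseen2 (k : Int), PySem.Dict.contains_eq_isSome_get?, hv2]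
            rfl
          rw [if_neg (by rw [hs2]; simp)]
          have hg := hv2get (k : Int)
          rw [hv2] at hg
          have hkl : ((k : Int)) ∉ level := by
            intro hmem
            rw [if_pos hmem] at hg
            exact absurd hg.symm (by simp)
          have hvn : value.get? (k : Int) = none := by
            rw [if_neg hkl] at hg
            exact hg.symm
          have h := hidx k hk
          rw [hvn] at h
          rw [pvDiffFold, h, List.filter_filter]
          apply List.filter_congr
          intro x _
          rw [hrm2c x, ← hbs x]
          cases PySem.Set.contains removed x <;> cases PySem.Set.contains B2 x <;> simp
      have hrem2 : ∀ (k : Nat), k < orig.length → REM2.getD k 0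
          = (if V2.contains (k : Int) then 1
             else (((orig.getD k []).filter
                 (fun x => !PySem.Set.contains RM2 x)).length : Int)) := by
        intro k hk
        rw [hREM2]
        rw [hdec.2 k hk]
        by_cases hvc : V2.contains (k : Int)
        · rw [if_pos hvc, if_pos hvc]
          by_cases hvold : value.contains (k : Int)
          · rw [hrem k hk, if_pos hvold]
          · have hvoldf : value.contains (k : Int) = false := by
              revert hvold; cases value.contains (k : Int) <;> simp
            have hkl : ((k : Int)) ∈ level := by
              have h := hv2c (k : Int)
              rw [hvc, hvoldf] at h
              have : level.contains (k : Int) = true := by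
                revert h; cases level.contains (k : Int) <;> simp
              exact List.contains_iff_mem.mp this
            obtain ⟨_, _, hfilk⟩ := hlev1 k hk hkl
            rw [hrem k hk, if_neg hvold, hfilk]
            rfl
        · rw [if_neg hvc, if_neg hvc]
          have hvcf : V2.contains (k : Int) = false := by
            revert hvc; cases V2.contains (k : Int) <;> simp
          have h := hv2c (k : Int)
          rw [hvcf] at h
          have hvoldf : value.contains (k : Int) = false := by
            revert h; cases value.contains (k : Int) <;> simp
          rw [hrem k hk, if_neg (by rw [hvoldf]; simp)]
          have hnds : (orig.getD k []).Nodup := by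
            apply hnd
            rw [List.getD_eq_getElem orig [] hk]
            exact List.getElem_mem _
          have hfc : (orig.getD k []).filter (fun x => !PySem.Set.contains RM2 x)
              = (orig.getD k []).filter
                  (fun x => !(PySem.Set.contains removed x || B2.contains x)) := by
            apply List.filter_congr
            intro x _
            rw [hrm2c x]
          have hcnt : ((List.filter (fun x => !(PySem.Set.contains removed x || B2.contains x))
                (orig.getD k [])).length : Int)
              = ((List.filter (fun x => !PySem.Set.contains removed x)
                    (orig.getD k [])).length : Int)
                - ((B2.filter (fun v => (orig.getD k []).contains v)).length : Int) :=
            pvCount (orig.getD k []) B2 (fun x => PySem.Set.contains removed x) hnds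
              (by rw [hB2]; exact PySem.Set.nodup_ofList _) hbfresh
          rw [hfc, hcnt, PySem.List.pyGetD_natCast]
      have hlevel2 :
          (PySem.List.pyRange 0 ((orig.length : Nat) : Int)).foldl (fun fr j =>
            if !V2.contains j && (PySem.List.pyGetD REM2 j 0 == 1) then fr ++ [j] else fr) []
          = (pvUnpack I2 S2).map Prod.fst := by
        rw [pvUnpackFst I2 S2]
        rw [show ((I2.length : Nat) : Int) = ((orig.length : Nat) : Int) by
          rw [hI2]; simp [PySem.List.length_enumerate, hlen]]
        rw [PySem.List.foldl_append_if_eq_filter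
          (fun j => !V2.contains j && (PySem.List.pyGetD REM2 j 0 == 1))
          (PySem.List.pyRange 0 ((orig.length : Nat) : Int)) []]
        rw [List.nil_append]
        apply List.filter_congr
        intro j hj
        rw [PySem.List.mem_pyRange_one] at hj
        have hjk : j = ((j.toNat : Nat) : Int) := by omega
        have hkn : j.toNat < orig.length := by omega
        rw [hseen2 j]
        by_cases hvc : V2.contains j
        · simp [hvc]
        · have hvcf : V2.contains j = false := by
            revert hvc; cases V2.contains j <;> simp
          have hnone : V2.get? j = none := by
            rw [PySem.Dict.get?_eq_none_iff_contains]
            exact hvcf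
          have hIlen : I2.length = orig.length := by
            rw [hI2]; simp [PySem.List.length_enumerate, hlen]
          have hnone' : V2.get? ((j.toNat : Nat) : Int) = none := by rw [← hjk]; exact hnone
          have hgI : PySem.List.pyGetD I2 j []
              = (orig.getD j.toNat []).filter (fun x => !PySem.Set.contains RM2 x) := by
            rw [PySem.List.pyGetD_eq_getElem I2 [] (by omega)
              (by rw [hIlen]; exact_mod_cast hj.2)]
            have h := hidx2 j.toNat hkn
            rw [List.getD_eq_getElem I2 [] (by rw [hIlen]; exact hkn)] at h
            rw [hnone'] at h
            exact h
          have hRlen : REM2.length = orig.length := by rw [hREM2]; exact hdec.1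
          have hvcf' : V2.contains ((j.toNat : Nat) : Int) = false := by rw [← hjk]; exact hvcf
          have hgR : PySem.List.pyGetD REM2 j 0
              = (((orig.getD j.toNat []).filter
                  (fun x => !PySem.Set.contains RM2 x)).length : Int) := by
            rw [PySem.List.pyGetD_eq_getElem REM2 0 (by omega)
              (by rw [hRlen]; exact_mod_cast hj.2)]
            have h := hrem2 j.toNat hkn
            rw [List.getD_eq_getElem REM2 0 (by rw [hRlen]; exact hkn)] at h
            rw [h, if_neg (by rw [hvcf']; simp)]
          rw [hgI, hgR, hvcf]
          rw [Bool.eq_iff_iff]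
          simp only [Bool.not_false, Bool.true_and, Bool.false_or, beq_iff_eq,
            Bool.not_eq_eq_eq_not, Bool.not_true, bne_eq_false_iff_eq]
          omega
      refine ih I2 base S2 REM2 RM2 V2 _ ?_ hb ?_ hidx2 hrem2 hseen2 hlevel2
      · rw [hI2]; simp [PySem.List.length_enumerate, hlen]
      · rw [hREM2]; exact hdec.1

-- ===== VERDICT (by name: the statement is the Claim_ definition above) =====
theorem groom_indexes_spec : Claim_equal_groom_indexes := by
  intro indexes _ hpre
  unfold Spec_groom_indexes
  simp only [groom_indexes, groom_indexes_alt]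
  have horig : indexes.map PySem.Set.ofList = indexes := by
    have h1 : indexes.map PySem.Set.ofList = indexes.map id :=
      List.map_congr_left (fun s hs => pvOfListNodup s (hpre s hs))
    rw [h1, List.map_id]
  rw [horig]
  have hfin := pvMain indexes hpre (indexes.length + 1) indexes indexes PySem.Set.empty
    (indexes.map (fun s : PySem.Set Int => (s.length : Int))) PySem.Set.empty PySem.Dict.empty
    ((PySem.List.pyRange 0 (indexes.length : Int)).foldl (fun fr i =>
      if PySem.List.pyGetD (indexes.map (fun s : PySem.Set Int => (s.length : Int))) i 0 == 1
      then fr ++ [i] else fr) [])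
    rfl rfl (by simp)
    (by
      intro k hk
      rw [PySem.Dict.get?_empty]
      simp)
    (by
      intro k hk
      rw [PySem.Dict.contains_empty]
      rw [if_neg (by simp)]
      rw [pvGetDMap indexes (fun s : PySem.Set Int => (s.length : Int)) k hk []]
      simp)
    (by
      intro j
      rw [PySem.Dict.contains_empty]
      rfl)
    (by
      rw [pvUnpackFst indexes PySem.Set.empty]
      rw [PySem.List.foldl_append_if_eq_filter
        (fun i => PySem.List.pyGetD (indexes.map (fun s : PySem.Set Int => (s.length : Int))) i 0 == 1)
        (PySem.List.pyRange 0 (indexes.length : Int)) [], List.nil_append]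
      apply List.filter_congr
      intro j hj
      rw [PySem.List.mem_pyRange_one] at hj
      have hkn : j.toNat < indexes.length := by omega
      have hg1 : PySem.List.pyGetD (indexes.map (fun s : PySem.Set Int => (s.length : Int))) j 0
          = ((indexes.getD j.toNat []).length : Int) := by
        rw [PySem.List.pyGetD_eq_getElem _ 0 (by omega) (by
          rw [List.length_map]; exact_mod_cast hj.2)]
        rw [List.getElem_map, List.getD_eq_getElem indexes [] hkn]
      have hg2 : PySem.List.pyGetD indexes j [] = indexes.getD j.toNat [] := by
        rw [PySem.List.pyGetD_eq_getElem indexes [] (by omega) (by exact_mod_cast hj.2)]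
        rw [List.getD_eq_getElem indexes [] hkn]
      rw [hg1, hg2]
      have hce : PySem.Set.contains PySem.Set.empty j = false := rfl
      rw [hce]
      rw [Bool.eq_iff_iff]
      simp only [Bool.false_or, beq_iff_eq, Bool.not_eq_eq_eq_not, Bool.not_true,
        bne_eq_false_iff_eq]
      omega)
  unfold pvFinish at hfin
  exact hfin
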